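-- pv_equiv track=rewrite | github.com/DANU011/CodingTest | DANU/python/11899.py | count_unmatched_parentheses
-- ===== SOURCE A (Python) =====
-- def count_unmatched_parentheses(s):
--     stack = []
--     ret = 0
--     for c in s:
--         if c == '(':
--             stack.append(c)
--         else:
--             if stack:
--                 stack.pop()
--             else:
--                 ret += 1
--     return ret + len(stack)
-- ===== SOURCE B (Python) =====
-- def count_unmatched_parentheses(s):
--     bal = 0
--     m = 0
--     for c in s:
--         bal = bal + 1 if c == '(' else bal - 1
--         if bal < m:
--             m = bal
--     return bal - 2 * m
-- ===== Notes on version B (the rewrite author's own statement) =====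
-- stated objective: alternative
-- what changed: Replaces the explicit stack (append/pop) and separate unmatched-closer counter with a single integer running balance plus the minimum prefix balance; the answer is bal - 2*min (stack disappears entirely).
import Mathlib
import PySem

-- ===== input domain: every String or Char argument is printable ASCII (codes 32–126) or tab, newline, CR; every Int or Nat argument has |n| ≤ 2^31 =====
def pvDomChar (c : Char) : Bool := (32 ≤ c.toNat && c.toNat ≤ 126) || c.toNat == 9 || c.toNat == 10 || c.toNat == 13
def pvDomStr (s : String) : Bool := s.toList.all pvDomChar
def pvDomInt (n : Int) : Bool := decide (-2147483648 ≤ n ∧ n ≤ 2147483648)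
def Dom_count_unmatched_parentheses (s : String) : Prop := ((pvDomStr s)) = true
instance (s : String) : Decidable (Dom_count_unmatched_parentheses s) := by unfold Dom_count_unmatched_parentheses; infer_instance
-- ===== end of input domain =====

-- B replaces A's explicit stack and separate counter with a running balance and minimum
-- prefix balance (bal - 2*min), same O(n) time but O(1) space; alternative algorithm.


-- ===== PORT A =====
-- literal port: stack as List Char (append at end, pop from end), ret counter
def pvStepA (acc : List Char × Int) (c : Char) : List Char × Int :=
  if c = '(' then (acc.1 ++ ['('], acc.2)
  else if acc.1 ≠ [] then (acc.1.dropLast, acc.2)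
  else (acc.1, acc.2 + 1)

def count_unmatched_parentheses (s : String) : Int :=
  let fin := s.toList.foldl pvStepA ([], 0)
  fin.2 + fin.1.length

-- ===== PORT B =====
-- literal port of Source B: running balance and minimum prefix balance
def pvStepB (acc : Int × Int) (c : Char) : Int × Int :=
  let bal := if c = '(' then acc.1 + 1 else acc.1 - 1
  (bal, if bal < acc.2 then bal else acc.2)

def count_unmatched_parentheses_alt (s : String) : Int :=
  let fin := s.toList.foldl pvStepB (0, 0)
  fin.1 - 2 * fin.2

-- ===== PRECONDITION & SPEC =====
def Spec_count_unmatched_parentheses (s : String) (out : Int) : Prop := out = count_unmatched_parentheses_alt s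
instance (s : String) (out : Int) : Decidable (Spec_count_unmatched_parentheses s out) := by unfold Spec_count_unmatched_parentheses; infer_instance

-- ===== CLAIM (what is proved, stated in full; the proofs are below) =====
def Claim_equal_count_unmatched_parentheses : Prop := ∀ (s : String), Dom_count_unmatched_parentheses s → Spec_count_unmatched_parentheses s (count_unmatched_parentheses s)

-- ===== LEMMAS AND PROOFS =====

-- Invariant: stack length = bal - m.  Then A's final answer r' + |st'| equals
-- r + m + bal' - 2*m' for the B-fold run from (bal, m).
theorem pv_loop_corr (l : List Char) (st : List Char) (r bal m : Int)
    (h : (st.length : Int) = bal - m) :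
    (l.foldl pvStepA (st, r)).2 + ((l.foldl pvStepA (st, r)).1.length : Int)
      = r + m + (l.foldl pvStepB (bal, m)).1 - 2 * (l.foldl pvStepB (bal, m)).2 := by
  induction l generalizing st r bal m with
  | nil => simp; omega
  | cons c tl ih =>
    have hnn : (0 : Int) ≤ (st.length : Int) := by positivity
    simp only [List.foldl_cons]
    by_cases hc : c = '('
    · have hB : pvStepB (bal, m) c = (bal + 1, m) := by
        simp [pvStepB, hc]; omega
      have hA : pvStepA (st, r) c = (st ++ ['('], r) := by simp [pvStepA, hc]
      rw [hA, hB]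
      have := ih (st ++ ['(']) r (bal + 1) m (by simp; omega)
      omega
    · cases st with
      | nil =>
        have hA : pvStepA (([] : List Char), r) c = ([], r + 1) := by simp [pvStepA, hc]
        have hm : m = bal := by simp at h; omega
        have hB : pvStepB (bal, m) c = (bal - 1, bal - 1) := by
          simp [pvStepB, hc, hm]
        rw [hA, hB]
        have := ih [] (r + 1) (bal - 1) (bal - 1) (by simp)
        omega
      | cons x xs =>
        have hA : pvStepA (x :: xs, r) c = ((x :: xs).dropLast, r) := by
          simp [pvStepA, hc]
        have hlen : ((x :: xs).dropLast.length : Int) = (bal - 1) - m := by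
          simp [List.length_dropLast] at *
          omega
        have hm' : m ≤ bal - 1 := by
          simp at h; omega
        have hB : pvStepB (bal, m) c = (bal - 1, m) := by
          simp [pvStepB, hc]; omega
        rw [hA, hB]
        have := ih (x :: xs).dropLast r (bal - 1) m hlen
        omega

-- ===== VERDICT (by name: the statement is the Claim_ definition above) =====
theorem count_unmatched_parentheses_spec : Claim_equal_count_unmatched_parentheses := by
  intro s _
  unfold Spec_count_unmatched_parentheses count_unmatched_parentheses count_unmatched_parentheses_alt
  have := pv_loop_corr s.toList [] 0 0 0 (by simp)
  simp at this ⊢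
  omega
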